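-- pv_equiv track=rewrite | github.com/BezsalySlava/Dynamic-line | Main.py | SearchShear
-- ===== SOURCE A (Python) =====
-- import math
--
-- def SearchShear(A, B):
--     '''
--     Function takes two string and search coincidence string B in dynamic string A.
--     Used consistent shear string A and comparison with B.
--
--     Функция принимает две строки и ищет совпадение строки B в A.
--     Для сравнения используется поочерёдный срез из строки А и сравнение с В.
--
--     :param A:  Dynamic strind A. Строка с функцией динамического массива (имитации).
--     :param B: Search string. Искомая строка.
--     :return: True or False
--     '''
--
--     longA = len(A) + len(B) - 1  # Requied length to simulate a dynamic string.
--     # Требуемая длинна для имитации динамической строки.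
--     Coef = int(math.ceil(longA / len(A)))  # Coefficient multiplications. Коэфициент умножения.
--     localA = A * Coef
--
--     for i in range(0, (len(A))): # Limitation shear original string A.
--         # Используется ограничение подбора оригинальной строкой А.
--         if localA[i:(i+len(B))] == B:
--             return True
--     else: return False
-- ===== SOURCE B (Python) =====
-- def SearchShear(A, B):
--     # Different algorithm: instead of tiling A and scanning shifted slices, keep a set of
--     # candidate start offsets (0..len(A)-1) and filter it column by column of the pattern,
--     # indexing the cyclic string directly via modular arithmetic (no tiled copy, no slices).
--     n = len(A)
--     cand = list(range(n))
--     for j, ch in enumerate(B):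
--         cand = [i for i in cand if A[(i + j) % n] == ch]
--         if not cand:
--             return False
--     return True
-- ===== Notes on version B (the rewrite author's own statement) =====
-- stated objective: alternative
-- what changed: Replaces the tiled-copy-and-shifted-slice scan by a candidate-offset set that is filtered one pattern column at a time, reading the cyclic string directly through modular indexing (no tiled string, no slices), with early exit as soon as no candidate survives.
import Mathlib
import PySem

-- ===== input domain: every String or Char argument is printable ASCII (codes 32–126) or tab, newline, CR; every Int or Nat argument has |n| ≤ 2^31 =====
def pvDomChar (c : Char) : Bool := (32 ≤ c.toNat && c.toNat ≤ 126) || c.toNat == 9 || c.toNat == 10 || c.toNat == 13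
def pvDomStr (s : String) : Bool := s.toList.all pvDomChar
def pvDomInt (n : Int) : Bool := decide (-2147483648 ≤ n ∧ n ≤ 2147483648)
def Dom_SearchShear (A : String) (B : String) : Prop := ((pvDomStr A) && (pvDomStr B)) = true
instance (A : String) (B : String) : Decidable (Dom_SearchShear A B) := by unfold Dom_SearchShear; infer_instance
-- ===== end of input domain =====

-- B replaces the tiled-string shifted-slice scan by a candidate-offset set filtered one
-- pattern column at a time through modular indexing into A (objective: alternative).


-- ===== PORT A =====
-- the 'for i in range(0, len(A)): if localA[i:i+len(B)] == B: return True / else: return False' loop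
def pvShearLoop (localA : List Char) (b : List Char) : List Int → Bool
  | [] => false
  | i :: rest =>
      if PySem.List.slice localA (some i) (some (i + (b.length : Int))) = b then true
      else pvShearLoop localA b rest

def SearchShear (A : String) (B : String) : Bool :=
  let a := A.toList
  let b := B.toList
  let longA : Int := (a.length : Int) + (b.length : Int) - 1
  -- Coef = int(math.ceil(longA / len(A))): exact ceiling division (Python's float division
  -- followed by math.ceil is exact for the Dom-sized lengths involved)
  let coef : Int := -(PySem.Int.floordiv (-longA) (a.length : Int))
  let localA := PySem.List.pyRepeat a coef
  pvShearLoop localA b (PySem.List.pyRange 0 (a.length : Int))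

-- ===== PORT B =====
-- 'cand = [i for i in cand if A[(i+j) % n] == ch]; if not cand: return False' per pattern column
def pvColFilter (a : List Char) (n : Int) : List (Int × Char) → List Int → Bool
  | [], _ => true
  | (j, c) :: rest, cand =>
      let cand' := cand.filter (fun i => PySem.List.pyGet? a (PySem.Int.mod (i + j) n) == some c)
      if cand'.isEmpty then false else pvColFilter a n rest cand'

def SearchShear_alt (A : String) (B : String) : Bool :=
  let a := A.toList
  let b := B.toList
  let n : Int := (a.length : Int)
  pvColFilter a n (PySem.List.enumerate b 0) (PySem.List.pyRange 0 n)

-- ===== PRECONDITION & SPEC =====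
-- Python A divides by len(A): ZeroDivisionError when A is empty.
def Pre_SearchShear (A : String) (B : String) : Prop := A ≠ ""
instance (A : String) (B : String) : Decidable (Pre_SearchShear A B) := by unfold Pre_SearchShear; infer_instance
def pvWitness_SearchShear : String × String := ("ab", "ba")

def Spec_SearchShear (A : String) (B : String) (out : Bool) : Prop := out = SearchShear_alt A B
instance (A : String) (B : String) (out : Bool) : Decidable (Spec_SearchShear A B out) := by unfold Spec_SearchShear; infer_instance

-- ===== CLAIM (what is proved, stated in full; the proofs are below) =====
def Claim_equal_SearchShear : Prop := ∀ (A : String) (B : String), Dom_SearchShear A B → Pre_SearchShear A B → Spec_SearchShear A B (SearchShear A B)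

-- ===== LEMMAS AND PROOFS =====

-- a power of a, read at p < k*|a|, is a read of a at p % |a|
lemma rep_getElem? (a : List Char) : ∀ (k p : Nat), p < k * a.length →
    ((List.replicate k a).flatten)[p]? = a[p % a.length]? := by
  intro k
  induction k with
  | zero => intro p hp; rw [Nat.zero_mul] at hp; omega
  | succ k ih =>
      intro p hp
      rw [Nat.succ_mul] at hp
      rw [List.replicate_succ, List.flatten_cons]
      by_cases hpn : p < a.length
      · rw [List.getElem?_append_left hpn, Nat.mod_eq_of_lt hpn]
      · push_neg at hpn
        rw [List.getElem?_append_right hpn, Nat.mod_eq_sub_mod hpn]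
        exact ih (p - a.length) (by omega)

-- prefix = pointwise agreement via getElem?
lemma prefix_iff_forall (b L : List Char) :
    b <+: L ↔ ∀ j, (hj : j < b.length) → L[j]? = some b[j] := by
  constructor
  · rintro ⟨t, rfl⟩ j hj
    rw [List.getElem?_append_left hj, List.getElem?_eq_getElem hj]
  · intro h
    rcases Nat.eq_zero_or_pos b.length with hb | hb
    · simp [List.length_eq_zero_iff.mp hb]
    · have hlen : b.length ≤ L.length := by
        have hx := h (b.length - 1) (by omega)
        have hlt : b.length - 1 < L.length := by
          by_contra hc
          push_neg at hc
          rw [List.getElem?_eq_none hc] at hx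
          exact (Option.some_ne_none _ hx.symm)
        omega
      have hT : L.take b.length = b := by
        apply List.ext_getElem?
        intro j
        by_cases hj : j < b.length
        · rw [List.getElem?_take_of_lt hj, h j hj, List.getElem?_eq_getElem hj]
        · push_neg at hj
          rw [List.getElem?_eq_none (l := b) (by omega),
              List.getElem?_eq_none (by simp; omega)]
      exact hT ▸ List.take_prefix b.length L

-- the A-side loop succeeds iff some admissible offset gives a prefix match
lemma pvShearLoop_iff (localA b : List Char) (n : Nat) :
    pvShearLoop localA b (PySem.List.pyRange 0 (n : Int)) = true ↔
      ∃ j < n, b <+: localA.drop j := by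
  have key : ∀ is : List Int,
      (∀ i ∈ is, 0 ≤ i ∧ i < (n : Int)) →
      (pvShearLoop localA b is = true ↔ ∃ j < n, ((j : Int) ∈ is) ∧ b <+: localA.drop j) := by
    intro is
    induction is with
    | nil => simp [pvShearLoop]
    | cons i rest ih =>
      intro hmem
      obtain ⟨hi0, hin⟩ := hmem i (by simp)
      obtain ⟨ji, rfl⟩ : ∃ j : Nat, i = (j : Int) := ⟨i.toNat, by omega⟩
      simp only [pvShearLoop]
      rw [show ((ji : Int) + (b.length : Int)) = ((ji : Int) + ((b.length : Nat) : Int)) from rfl,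
        PySem.List.slice_natCast_add]
      split_ifs with h
      · simp only [true_iff]
        refine ⟨ji, by omega, by simp, ?_⟩
        exact h ▸ List.take_prefix b.length (localA.drop ji)
      · rw [ih (fun x hx => hmem x (by simp [hx]))]
        constructor
        · rintro ⟨j, hj, hjmem, hjpre⟩
          exact ⟨j, hj, by simp [hjmem], hjpre⟩
        · rintro ⟨j, hj, hjmem, hjpre⟩
          refine ⟨j, hj, ?_, hjpre⟩
          rcases List.mem_cons.mp hjmem with heq | hmem'
          · exfalso
            apply h
            rw [show ji = j by omega]
            exact (List.prefix_iff_eq_take.mp hjpre).symm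
          · exact hmem'
  rw [key _ (fun i hi => by
    have := PySem.List.mem_pyRange_one.mp hi
    exact ⟨this.1, this.2⟩)]
  constructor
  · rintro ⟨j, hj, _, hp⟩
    exact ⟨j, hj, hp⟩
  · rintro ⟨j, hj, hp⟩
    exact ⟨j, hj, PySem.List.mem_pyRange_one.mpr (by omega), hp⟩

-- the B-side column filter succeeds iff some surviving candidate matches every column
lemma pvColFilter_iff (a : List Char) (n : Int) :
    ∀ (pairs : List (Int × Char)) (cand : List Int), cand ≠ [] →
      (pvColFilter a n pairs cand = true ↔
        ∃ i ∈ cand, ∀ p ∈ pairs, PySem.List.pyGet? a (PySem.Int.mod (i + p.1) n) = some p.2) := by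
  intro pairs
  induction pairs with
  | nil =>
      intro cand hc
      rcases List.exists_mem_of_ne_nil cand hc with ⟨i, hi⟩
      simp only [pvColFilter, true_iff]
      exact ⟨i, hi, fun p hp => absurd hp (List.not_mem_nil)⟩
  | cons p rest ih =>
      intro cand hc
      obtain ⟨j, c⟩ := p
      simp only [pvColFilter]
      set cand' := cand.filter (fun i => PySem.List.pyGet? a (PySem.Int.mod (i + j) n) == some c) with hc'
      by_cases hemp : cand'.isEmpty
      · rw [if_pos hemp]
        simp only [Bool.false_eq_true, false_iff]
        rintro ⟨i, hi, hall⟩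
        have : i ∈ cand' := by
          rw [hc', List.mem_filter]
          exact ⟨hi, by simp [hall (j, c) (by simp)]⟩
        rw [List.isEmpty_iff] at hemp
        simp [hemp] at this
      · rw [if_neg hemp]
        rw [ih cand' (by simpa [List.isEmpty_iff] using hemp)]
        constructor
        · rintro ⟨i, hi, hall⟩
          rw [hc', List.mem_filter] at hi
          refine ⟨i, hi.1, fun q hq => ?_⟩
          rcases List.mem_cons.mp hq with rfl | hq'
          · simpa using hi.2
          · exact hall q hq'
        · rintro ⟨i, hi, hall⟩
          refine ⟨i, ?_, fun q hq => hall q (by simp [hq])⟩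
          rw [hc', List.mem_filter]
          exact ⟨hi, by simp [hall (j, c) (by simp)]⟩

-- ===== VERDICT =====
theorem SearchShear_spec : Claim_equal_SearchShear := by
  intro A B _ hpre
  unfold Spec_SearchShear SearchShear SearchShear_alt
  simp only []
  set a := A.toList with ha
  set b := B.toList with hb
  set n := a.length with hn'
  set m := b.length with hm'
  have hanil : a ≠ [] := by simp_all [Pre_SearchShear]
  have hn : 1 ≤ n := by
    rcases a with _ | _
    · exact absurd rfl hanil
    · simp [hn']
  -- A's repetition count, via the exact ceiling bracket
  set coef : Int := -(PySem.Int.floordiv (-((n : Int) + (m : Int) - 1)) (n : Int)) with hcoef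
  have hcb : (coef - 1) * n < (n : Int) + (m : Int) - 1 ∧ (n : Int) + (m : Int) - 1 ≤ coef * n :=
    (PySem.Int.neg_floordiv_neg_eq_iff_of_pos (by exact_mod_cast hn)).mp hcoef.symm
  have hc0 : 0 ≤ coef := by nlinarith [hcb.1, hcb.2]
  have hrepA : PySem.List.pyRepeat a coef = (List.replicate coef.toNat a).flatten := rfl
  have hlen1 : (List.replicate coef.toNat a).flatten.length = coef.toNat * n := by
    simp [List.length_flatten, List.map_replicate, List.sum_replicate, smul_eq_mul]
    exact Or.inl hn'.symm
  have hLc : n + m - 1 ≤ coef.toNat * n := by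
    by_contra hcon
    push_neg at hcon
    have h' : ((coef.toNat * n : Nat) : Int) < ((n + m - 1 : Nat) : Int) := by exact_mod_cast hcon
    rw [Nat.cast_mul, Int.toNat_of_nonneg hc0] at h'
    have h2 := hcb.2
    omega
  rw [hrepA]
  apply Bool.eq_iff_iff.mpr
  rw [pvShearLoop_iff,
    pvColFilter_iff a (n : Int) (PySem.List.enumerate b 0) (PySem.List.pyRange 0 (n : Int))
      (by
        intro hnil
        have : (0 : Int) ∈ PySem.List.pyRange 0 (n : Int) :=
          PySem.List.mem_pyRange_one.mpr (by omega)
        simp [hnil] at this)]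
  -- both sides ↔ ∃ i < n, ∀ j < m, a[(i+j) % n]? = some b[j]
  constructor
  · rintro ⟨i, hi, hp⟩
    refine ⟨(i : Int), PySem.List.mem_pyRange_one.mpr (by omega), ?_⟩
    intro p hp'
    rw [PySem.List.mem_enumerate_iff] at hp'
    obtain ⟨k, hk, rfl⟩ := hp'
    have hik : i + k < coef.toNat * a.length := by rw [← hn']; omega
    have hpt := (prefix_iff_forall b _).mp hp k hk
    rw [List.getElem?_drop, rep_getElem? a coef.toNat (i + k) hik] at hpt
    have hcast : (i : Int) + ((0 : Int) + (k : Int)) = (((i + k : Nat) : Int)) := by push_cast; ring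
    rw [hcast, PySem.Int.mod_natCast, PySem.List.pyGet?_natCast]
    exact hpt
  · rintro ⟨i, hi, hall⟩
    have hi' := PySem.List.mem_pyRange_one.mp hi
    obtain ⟨i', rfl⟩ : ∃ i' : Nat, i = (i' : Int) := ⟨i.toNat, by omega⟩
    have hi'n : i' < n := by exact_mod_cast hi'.2
    refine ⟨i', hi'n, (prefix_iff_forall b _).mpr ?_⟩
    intro k hk
    have hq := hall ((0 : Int) + (k : Int), b[k])
      ((PySem.List.mem_enumerate_iff b 0 _).mpr ⟨k, hk, rfl⟩)
    have hcast : (i' : Int) + ((0 : Int) + (k : Int)) = (((i' + k : Nat) : Int)) := by push_cast; ring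
    rw [hcast, PySem.Int.mod_natCast, PySem.List.pyGet?_natCast] at hq
    have hik : i' + k < coef.toNat * a.length := by rw [← hn']; omega
    rw [List.getElem?_drop, rep_getElem? a coef.toNat (i' + k) hik]
    exact hq
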